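-- pv_equiv track=rewrite | github.com/rev88/scraping | JobPortal_Common_Defs.py | job_categorisation
-- ===== SOURCE A (Python) =====
-- def job_categorisation(job_arr):
--     job_arr = job_arr.strip('"')
--     keywords_dict = {"Testing": ["sdet", "qa", "qa automation", "software developer in test", "qa analyst"],
--                      "java developer":
--                          ["java developer", "developer", "full stack java developer", "Devops engineer",
--                           "java api developer", "java",
--                           "java liferay developer", "angular"],
--                      "python developer": ["django", "python django developer", "python", "flask",
--                                           "python developer", "backend", "developer"]}
--     for keys in keywords_dict:
--         if job_arr in keywords_dict[keys]:
--             return keys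
-- ===== SOURCE B (Python) =====
-- def job_categorisation(job_arr):
--     job_arr = job_arr.strip('"')
--     keywords_dict = {"Testing": ["sdet", "qa", "qa automation", "software developer in test", "qa analyst"],
--                      "java developer":
--                          ["java developer", "developer", "full stack java developer", "Devops engineer",
--                           "java api developer", "java",
--                           "java liferay developer", "angular"],
--                      "python developer": ["django", "python django developer", "python", "flask",
--                                           "python developer", "backend", "developer"]}
--     reverse = {}
--     for cat, kws in keywords_dict.items():
--         for kw in kws:
--             reverse.setdefault(kw, cat)
--     return reverse.get(job_arr)
-- ===== Notes on version B (the rewrite author's own statement) =====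
-- stated objective: idiomatic
-- what changed: Replaces A's per-query scan over each category's keyword list with a reverse keyword-to-category index built once with setdefault (first category wins, matching A's first-match order) followed by a single dict lookup.
import Mathlib
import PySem

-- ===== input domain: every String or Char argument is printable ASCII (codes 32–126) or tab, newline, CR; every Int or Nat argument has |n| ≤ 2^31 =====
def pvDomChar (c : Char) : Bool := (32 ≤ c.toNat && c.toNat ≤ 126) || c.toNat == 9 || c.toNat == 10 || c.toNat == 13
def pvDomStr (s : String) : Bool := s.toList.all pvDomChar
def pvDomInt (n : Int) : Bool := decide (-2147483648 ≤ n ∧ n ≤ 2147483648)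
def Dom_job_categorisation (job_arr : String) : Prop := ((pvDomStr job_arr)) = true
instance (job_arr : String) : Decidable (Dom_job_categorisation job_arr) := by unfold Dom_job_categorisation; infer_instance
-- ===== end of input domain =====

-- B builds a reverse keyword→category index once (setdefault, first category wins) and answers by one lookup, instead of A's scan of each category's keyword list; idiomatic restructuring, no speed claim.

-- shared data: the keywords_dict literal both pythons contain, in insertion order
def pvKeywords : List (String × List String) :=
  [("Testing", ["sdet", "qa", "qa automation", "software developer in test", "qa analyst"]),
   ("java developer",
      ["java developer", "developer", "full stack java developer", "Devops engineer",
       "java api developer", "java", "java liferay developer", "angular"]),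
   ("python developer",
      ["django", "python django developer", "python", "flask",
       "python developer", "backend", "developer"])]


-- ===== PORT A =====
-- the 'for keys in keywords_dict: if job_arr in keywords_dict[keys]: return keys' loop
def pvFirstMatch (j : String) : List (String × List String) → Option String
  | [] => none
  | (k, v) :: rest => if v.contains j then some k else pvFirstMatch j rest

def job_categorisation (job_arr : String) : Option String :=
  let j := PySem.Str.stripChars job_arr "\""
  pvFirstMatch j pvKeywords

-- ===== PORT B =====
-- reverse = {}; for cat, kws in items: for kw in kws: reverse.setdefault(kw, cat)
def pvReverse : PySem.Dict String String :=
  pvKeywords.foldl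
    (fun d p => p.2.foldl (fun d kw => d.setdefault kw p.1) d)
    (PySem.Dict.mk [])

def job_categorisation_alt (job_arr : String) : Option String :=
  let j := PySem.Str.stripChars job_arr "\""
  pvReverse.get? j

-- ===== PRECONDITION & SPEC =====
def Spec_job_categorisation (job_arr : String) (out : Option String) : Prop := out = job_categorisation_alt job_arr
instance (job_arr : String) (out : Option String) : Decidable (Spec_job_categorisation job_arr out) := by unfold Spec_job_categorisation; infer_instance

-- ===== CLAIM (what is proved, stated in full; the proofs are below) =====
def Claim_equal_job_categorisation : Prop := ∀ (job_arr : String), Dom_job_categorisation job_arr → Spec_job_categorisation job_arr (job_categorisation job_arr)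

-- ===== LEMMAS AND PROOFS =====
lemma pvKey (j : String) : pvFirstMatch j pvKeywords = pvReverse.get? j := by
  by_cases h0 : j = "sdet"
  · subst h0; rfl
  by_cases h1 : j = "qa"
  · subst h1; rfl
  by_cases h2 : j = "qa automation"
  · subst h2; rfl
  by_cases h3 : j = "software developer in test"
  · subst h3; rfl
  by_cases h4 : j = "qa analyst"
  · subst h4; rfl
  by_cases h5 : j = "java developer"
  · subst h5; rfl
  by_cases h6 : j = "developer"
  · subst h6; rfl
  by_cases h7 : j = "full stack java developer"
  · subst h7; rfl
  by_cases h8 : j = "Devops engineer"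
  · subst h8; rfl
  by_cases h9 : j = "java api developer"
  · subst h9; rfl
  by_cases h10 : j = "java"
  · subst h10; rfl
  by_cases h11 : j = "java liferay developer"
  · subst h11; rfl
  by_cases h12 : j = "angular"
  · subst h12; rfl
  by_cases h13 : j = "django"
  · subst h13; rfl
  by_cases h14 : j = "python django developer"
  · subst h14; rfl
  by_cases h15 : j = "python"
  · subst h15; rfl
  by_cases h16 : j = "flask"
  · subst h16; rfl
  by_cases h17 : j = "python developer"
  · subst h17; rfl
  by_cases h18 : j = "backend"
  · subst h18; rfl
  simp [pvFirstMatch, pvKeywords, pvReverse, pvKeywords, PySem.Dict.get?,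
    PySem.Dict.setdefault, PySem.Dict.contains,
    h0, Ne.symm h0, h1, Ne.symm h1, h2, Ne.symm h2, h3, Ne.symm h3, h4, Ne.symm h4, h5, Ne.symm h5, h6, Ne.symm h6, h7, Ne.symm h7, h8, Ne.symm h8, h9, Ne.symm h9, h10, Ne.symm h10, h11, Ne.symm h11, h12, Ne.symm h12, h13, Ne.symm h13, h14, Ne.symm h14, h15, Ne.symm h15, h16, Ne.symm h16, h17, Ne.symm h17, h18, Ne.symm h18]

-- ===== VERDICT (by name: the statement is the Claim_ definition above) =====
theorem job_categorisation_spec : Claim_equal_job_categorisation := by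
  intro j _
  unfold Spec_job_categorisation job_categorisation job_categorisation_alt
  exact pvKey _
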